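-- pv_equiv track=rewrite | github.com/MsiziK/xds_dovs | log_to_db.py | parse_session_block
-- ===== SOURCE A (Python) =====
-- def parse_session_block(block):
--     """Extract verification session details from log block."""
--     session = {
--         "timestamp": None,
--         "client_id": None,
--         "status": None,
--         "details": None,
--         "name": None,
--         "id_number": None,
--         "email": None,
--         "id_photo": None,
--         "selfie_photo": None
--     }
--
--     for line in block.split("\n"):
--         line = line.strip()
--         if line.startswith("Timestamp:"):
--             session["timestamp"] = line.split("Timestamp:")[1].strip()
--         elif line.startswith("ClientID:"):
--             session["client_id"] = line.split("ClientID:")[1].strip()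
--         elif line.startswith("Verification Status:"):
--             session["status"] = line.split("Verification Status:")[1].strip()
--         elif line.startswith("Details:"):
--             session["details"] = line.split("Details:")[1].strip()
--         elif line.startswith("Name:"):
--             session["name"] = line.split("Name:")[1].strip()
--         elif line.startswith("ID Number:"):
--             session["id_number"] = line.split("ID Number:")[1].strip()
--         elif line.startswith("Email:"):
--             session["email"] = line.split("Email:")[1].strip()
--         elif line.startswith("ConsumerIDPhoto:"):
--             session["id_photo"] = line.split("ConsumerIDPhoto:")[1].strip()
--         elif line.startswith("ConsumerCapturedPhoto:"):
--             session["selfie_photo"] = line.split("ConsumerCapturedPhoto:")[1].strip()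
--
--     return session
-- ===== SOURCE B (Python) =====
-- FIELDS = [
--     ("timestamp", "Timestamp:"),
--     ("client_id", "ClientID:"),
--     ("status", "Verification Status:"),
--     ("details", "Details:"),
--     ("name", "Name:"),
--     ("id_number", "ID Number:"),
--     ("email", "Email:"),
--     ("id_photo", "ConsumerIDPhoto:"),
--     ("selfie_photo", "ConsumerCapturedPhoto:"),
-- ]
--
--
-- def parse_session_block(block):
--     """Extract verification session details from log block."""
--     lines = [line.strip() for line in block.split("\n")]
--     session = {}
--     for key, prefix in FIELDS:
--         value = None
--         for line in lines:
--             if line.startswith(prefix):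
--                 value = line.split(prefix)[1].strip()
--         session[key] = value
--     return session
-- ===== Notes on version B (the rewrite author's own statement) =====
-- stated objective: simpler
-- what changed: Replaces the nine-branch if/elif ladder dispatching per line with a field-table pass: for each (key, prefix) pair B scans the stripped lines once and keeps the last matching value, eliminating the ladder entirely.
import Mathlib
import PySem

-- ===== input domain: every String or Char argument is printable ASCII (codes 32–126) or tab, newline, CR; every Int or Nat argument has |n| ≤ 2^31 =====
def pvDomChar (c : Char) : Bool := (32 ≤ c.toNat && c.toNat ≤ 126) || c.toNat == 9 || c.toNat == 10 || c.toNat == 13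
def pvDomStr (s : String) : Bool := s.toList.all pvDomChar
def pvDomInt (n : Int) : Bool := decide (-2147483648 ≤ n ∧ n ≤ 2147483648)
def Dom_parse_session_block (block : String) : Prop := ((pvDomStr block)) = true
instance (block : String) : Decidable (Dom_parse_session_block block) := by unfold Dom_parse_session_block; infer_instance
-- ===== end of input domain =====

-- B replaces A's per-line if/elif ladder with a field-table pass (per key, last matching stripped line wins); objective: simpler.


-- ===== PORT A =====
-- line.split(prefix): split? is `some` here (the separators are nonempty literals), ported as .getD [];
-- the [1] index is ported with pyGetD (default ""): it is only read under the startswith guard, where split yields ≥ 2 parts, so Python never raises.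
def pvStepA (session : PySem.Dict String (Option String)) (rawline : String) : PySem.Dict String (Option String) :=
  let line := PySem.Str.strip rawline
  if PySem.Str.startswith line "Timestamp:" then
    session.insert "timestamp" (some (PySem.Str.strip (PySem.List.pyGetD ((PySem.Str.split? line "Timestamp:").getD []) 1 "")))
  else if PySem.Str.startswith line "ClientID:" then
    session.insert "client_id" (some (PySem.Str.strip (PySem.List.pyGetD ((PySem.Str.split? line "ClientID:").getD []) 1 "")))
  else if PySem.Str.startswith line "Verification Status:" then
    session.insert "status" (some (PySem.Str.strip (PySem.List.pyGetD ((PySem.Str.split? line "Verification Status:").getD []) 1 "")))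
  else if PySem.Str.startswith line "Details:" then
    session.insert "details" (some (PySem.Str.strip (PySem.List.pyGetD ((PySem.Str.split? line "Details:").getD []) 1 "")))
  else if PySem.Str.startswith line "Name:" then
    session.insert "name" (some (PySem.Str.strip (PySem.List.pyGetD ((PySem.Str.split? line "Name:").getD []) 1 "")))
  else if PySem.Str.startswith line "ID Number:" then
    session.insert "id_number" (some (PySem.Str.strip (PySem.List.pyGetD ((PySem.Str.split? line "ID Number:").getD []) 1 "")))
  else if PySem.Str.startswith line "Email:" then
    session.insert "email" (some (PySem.Str.strip (PySem.List.pyGetD ((PySem.Str.split? line "Email:").getD []) 1 "")))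
  else if PySem.Str.startswith line "ConsumerIDPhoto:" then
    session.insert "id_photo" (some (PySem.Str.strip (PySem.List.pyGetD ((PySem.Str.split? line "ConsumerIDPhoto:").getD []) 1 "")))
  else if PySem.Str.startswith line "ConsumerCapturedPhoto:" then
    session.insert "selfie_photo" (some (PySem.Str.strip (PySem.List.pyGetD ((PySem.Str.split? line "ConsumerCapturedPhoto:").getD []) 1 "")))
  else session

def parse_session_block (block : String) : List (String × Option String) :=
  let session : PySem.Dict String (Option String) := PySem.Dict.ofList
    [("timestamp", none), ("client_id", none), ("status", none), ("details", none),
     ("name", none), ("id_number", none), ("email", none), ("id_photo", none), ("selfie_photo", none)]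
  (((PySem.Str.split? block "\n").getD []).foldl pvStepA session).items

-- ===== PORT B =====
def pvFields : List (String × String) :=
  [("timestamp", "Timestamp:"), ("client_id", "ClientID:"), ("status", "Verification Status:"),
   ("details", "Details:"), ("name", "Name:"), ("id_number", "ID Number:"), ("email", "Email:"),
   ("id_photo", "ConsumerIDPhoto:"), ("selfie_photo", "ConsumerCapturedPhoto:")]

-- inner loop of B: keep the value of the last line starting with `pre` ([1] index as in A's port)
def pvLastMatch (pre : String) (lines : List String) (v0 : Option String) : Option String :=
  lines.foldl (fun v line =>
    if PySem.Str.startswith line pre then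
      some (PySem.Str.strip (PySem.List.pyGetD ((PySem.Str.split? line pre).getD []) 1 ""))
    else v) v0

def parse_session_block_alt (block : String) : List (String × Option String) :=
  let lines := ((PySem.Str.split? block "\n").getD []).map PySem.Str.strip
  pvFields.map (fun kp => (kp.1, pvLastMatch kp.2 lines none))

-- ===== PRECONDITION & SPEC =====
def Spec_parse_session_block (block : String) (out : List (String × Option String)) : Prop := out = parse_session_block_alt block
instance (block : String) (out : List (String × Option String)) : Decidable (Spec_parse_session_block block out) := by unfold Spec_parse_session_block; infer_instance

-- ===== CLAIM (what is proved, stated in full; the proofs are below) =====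
def Claim_equal_parse_session_block : Prop := ∀ (block : String), Dom_parse_session_block block → Spec_parse_session_block block (parse_session_block block)

-- ===== LEMMAS AND PROOFS =====

-- two startswith guards with incomparable prefixes cannot both fire on one line
theorem pvExcl {p q s : String} (hpq : ¬ (p.toList <+: q.toList)) (hqp : ¬ (q.toList <+: p.toList))
    (h : PySem.Str.startswith s p = true) : PySem.Str.startswith s q = false := by
  by_contra hq
  rw [Bool.not_eq_false] at hq
  simp only [PySem.Str.startswith_eq, PySem.Chars.startswith_iff] at h hq
  rcases List.prefix_or_prefix_of_prefix h hq with h' | h'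
  · exact hpq h'
  · exact hqp h'

-- one A-step on the nine-field dict updates each field independently
theorem pvStepA_eq (a : String) (v1 v2 v3 v4 v5 v6 v7 v8 v9 : Option String) :
    pvStepA (PySem.Dict.mk
      [("timestamp", v1), ("client_id", v2), ("status", v3), ("details", v4),
       ("name", v5), ("id_number", v6), ("email", v7), ("id_photo", v8), ("selfie_photo", v9)]) a
    = PySem.Dict.mk
      [("timestamp", pvLastMatch "Timestamp:" [PySem.Str.strip a] v1),
       ("client_id", pvLastMatch "ClientID:" [PySem.Str.strip a] v2),
       ("status", pvLastMatch "Verification Status:" [PySem.Str.strip a] v3),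
       ("details", pvLastMatch "Details:" [PySem.Str.strip a] v4),
       ("name", pvLastMatch "Name:" [PySem.Str.strip a] v5),
       ("id_number", pvLastMatch "ID Number:" [PySem.Str.strip a] v6),
       ("email", pvLastMatch "Email:" [PySem.Str.strip a] v7),
       ("id_photo", pvLastMatch "ConsumerIDPhoto:" [PySem.Str.strip a] v8),
       ("selfie_photo", pvLastMatch "ConsumerCapturedPhoto:" [PySem.Str.strip a] v9)] := by
  unfold pvStepA pvLastMatch
  dsimp only
  split_ifs with h1 h2 h3 h4 h5 h6 h7 h8 h9
  · -- branch 1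
    have e2 := pvExcl (q := "ClientID:") (by decide) (by decide) h1
    have e3 := pvExcl (q := "Verification Status:") (by decide) (by decide) h1
    have e4 := pvExcl (q := "Details:") (by decide) (by decide) h1
    have e5 := pvExcl (q := "Name:") (by decide) (by decide) h1
    have e6 := pvExcl (q := "ID Number:") (by decide) (by decide) h1
    have e7 := pvExcl (q := "Email:") (by decide) (by decide) h1
    have e8 := pvExcl (q := "ConsumerIDPhoto:") (by decide) (by decide) h1
    have e9 := pvExcl (q := "ConsumerCapturedPhoto:") (by decide) (by decide) h1
    simp_all [PySem.Dict.insert, List.foldl]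
  · -- branch 2
    have e3 := pvExcl (q := "Verification Status:") (by decide) (by decide) h2
    have e4 := pvExcl (q := "Details:") (by decide) (by decide) h2
    have e5 := pvExcl (q := "Name:") (by decide) (by decide) h2
    have e6 := pvExcl (q := "ID Number:") (by decide) (by decide) h2
    have e7 := pvExcl (q := "Email:") (by decide) (by decide) h2
    have e8 := pvExcl (q := "ConsumerIDPhoto:") (by decide) (by decide) h2
    have e9 := pvExcl (q := "ConsumerCapturedPhoto:") (by decide) (by decide) h2
    simp_all [PySem.Dict.insert, List.foldl]
  · -- branch 3
    have e4 := pvExcl (q := "Details:") (by decide) (by decide) h3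
    have e5 := pvExcl (q := "Name:") (by decide) (by decide) h3
    have e6 := pvExcl (q := "ID Number:") (by decide) (by decide) h3
    have e7 := pvExcl (q := "Email:") (by decide) (by decide) h3
    have e8 := pvExcl (q := "ConsumerIDPhoto:") (by decide) (by decide) h3
    have e9 := pvExcl (q := "ConsumerCapturedPhoto:") (by decide) (by decide) h3
    simp_all [PySem.Dict.insert, List.foldl]
  · -- branch 4
    have e5 := pvExcl (q := "Name:") (by decide) (by decide) h4
    have e6 := pvExcl (q := "ID Number:") (by decide) (by decide) h4
    have e7 := pvExcl (q := "Email:") (by decide) (by decide) h4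
    have e8 := pvExcl (q := "ConsumerIDPhoto:") (by decide) (by decide) h4
    have e9 := pvExcl (q := "ConsumerCapturedPhoto:") (by decide) (by decide) h4
    simp_all [PySem.Dict.insert, List.foldl]
  · -- branch 5
    have e6 := pvExcl (q := "ID Number:") (by decide) (by decide) h5
    have e7 := pvExcl (q := "Email:") (by decide) (by decide) h5
    have e8 := pvExcl (q := "ConsumerIDPhoto:") (by decide) (by decide) h5
    have e9 := pvExcl (q := "ConsumerCapturedPhoto:") (by decide) (by decide) h5
    simp_all [PySem.Dict.insert, List.foldl]
  · -- branch 6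
    have e7 := pvExcl (q := "Email:") (by decide) (by decide) h6
    have e8 := pvExcl (q := "ConsumerIDPhoto:") (by decide) (by decide) h6
    have e9 := pvExcl (q := "ConsumerCapturedPhoto:") (by decide) (by decide) h6
    simp_all [PySem.Dict.insert, List.foldl]
  · -- branch 7
    have e8 := pvExcl (q := "ConsumerIDPhoto:") (by decide) (by decide) h7
    have e9 := pvExcl (q := "ConsumerCapturedPhoto:") (by decide) (by decide) h7
    simp_all [PySem.Dict.insert, List.foldl]
  · -- branch 8
    have e9 := pvExcl (q := "ConsumerCapturedPhoto:") (by decide) (by decide) h8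
    simp_all [PySem.Dict.insert, List.foldl]
  · -- branch 9
    simp_all [PySem.Dict.insert, List.foldl]
  · simp_all [List.foldl]

-- the A-fold over the nine-field dict is nine independent last-match folds
theorem pvFold_eq (l : List String) (v1 v2 v3 v4 v5 v6 v7 v8 v9 : Option String) :
    l.foldl pvStepA (PySem.Dict.mk
      [("timestamp", v1), ("client_id", v2), ("status", v3), ("details", v4),
       ("name", v5), ("id_number", v6), ("email", v7), ("id_photo", v8), ("selfie_photo", v9)])
    = PySem.Dict.mk
      [("timestamp", pvLastMatch "Timestamp:" (l.map PySem.Str.strip) v1),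
       ("client_id", pvLastMatch "ClientID:" (l.map PySem.Str.strip) v2),
       ("status", pvLastMatch "Verification Status:" (l.map PySem.Str.strip) v3),
       ("details", pvLastMatch "Details:" (l.map PySem.Str.strip) v4),
       ("name", pvLastMatch "Name:" (l.map PySem.Str.strip) v5),
       ("id_number", pvLastMatch "ID Number:" (l.map PySem.Str.strip) v6),
       ("email", pvLastMatch "Email:" (l.map PySem.Str.strip) v7),
       ("id_photo", pvLastMatch "ConsumerIDPhoto:" (l.map PySem.Str.strip) v8),
       ("selfie_photo", pvLastMatch "ConsumerCapturedPhoto:" (l.map PySem.Str.strip) v9)] := by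
  induction l generalizing v1 v2 v3 v4 v5 v6 v7 v8 v9 with
  | nil => simp [pvLastMatch]
  | cons a l ih =>
      rw [List.foldl_cons, pvStepA_eq, ih]
      simp [pvLastMatch, List.foldl]

-- ===== VERDICT (by name: the statement is the Claim_ definition above) =====
theorem parse_session_block_spec : Claim_equal_parse_session_block := by
  intro block _
  unfold Spec_parse_session_block parse_session_block parse_session_block_alt
  dsimp only
  rw [show (PySem.Dict.ofList
      [("timestamp", (none : Option String)), ("client_id", none), ("status", none), ("details", none),
       ("name", none), ("id_number", none), ("email", none), ("id_photo", none), ("selfie_photo", none)]) =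
      PySem.Dict.mk
      [("timestamp", none), ("client_id", none), ("status", none), ("details", none),
       ("name", none), ("id_number", none), ("email", none), ("id_photo", none), ("selfie_photo", none)] from by decide]
  rw [pvFold_eq]
  simp [pvFields]
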